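-- pv_equiv track=rewrite | github.com/akeavenyhelioscta/test-repo | backend/scrapes/power/pjm/transmission_outages.py | _parse_trailing_metadata
-- ===== SOURCE A (Python) =====
-- def _parse_trailing_metadata(line: str, match_end: int) -> dict:
--     """Best-effort extraction of metadata after last_revised."""
--     trailing = line[match_end:].strip().rstrip("|").strip()
--     parts = [p for p in trailing.split() if p != "|"]
--
--     meta = {
--         "rtep": "",
--         "availability": "",
--         "risk": "",
--         "approval_status": "",
--         "on_time": "",
--     }
--
--     known_avail = {"Duration"}
--     known_yesno = {"No", "Yes"}
--     known_approval = {"Submitted", "Approved", "Received", "Withdrawn", "Denied"}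
--
--     idx = 0
--     # RTEP (optional, appears before availability)
--     if idx < len(parts) and parts[idx] not in known_avail and parts[idx] not in known_yesno:
--         meta["rtep"] = parts[idx]
--         idx += 1
--     # availability
--     if idx < len(parts) and parts[idx] in known_avail:
--         meta["availability"] = parts[idx]
--         idx += 1
--     # risk
--     if idx < len(parts) and parts[idx] in known_yesno:
--         meta["risk"] = parts[idx]
--         idx += 1
--     # approval_status
--     if idx < len(parts) and parts[idx] in known_approval:
--         meta["approval_status"] = parts[idx]
--         idx += 1
--     # on_time
--     if idx < len(parts) and parts[idx] in known_yesno: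
--         meta["on_time"] = parts[idx]
--         idx += 1
--
--     return meta
-- ===== SOURCE B (Python) =====
-- def _parse_trailing_metadata(line: str, match_end: int) -> dict:
--     """Best-effort extraction of metadata after last_revised.
--
--     Token-driven dual of the field-driven parse: instead of walking the five
--     fields and testing the current token, walk the TOKENS and give each one to
--     the earliest still-unfilled field that accepts it; fields skipped over can
--     never be filled later, and a token no remaining field accepts ends the parse.
--     """
--     trailing = line[match_end:].strip().rstrip("|").strip()
--     parts = [p for p in trailing.split() if p != "|"]
--
--     known_avail = {"Duration"}
--     known_yesno = {"No", "Yes"}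
--     known_approval = {"Submitted", "Approved", "Received", "Withdrawn", "Denied"}
--
--     def accepts(field, token):
--         if field == "rtep":
--             return token not in known_avail and token not in known_yesno
--         if field == "availability":
--             return token in known_avail
--         if field == "approval_status":
--             return token in known_approval
--         return token in known_yesno  # risk / on_time
--
--     fields = ["rtep", "availability", "risk", "approval_status", "on_time"]
--     assigned = {}
--     remaining = fields
--     for token in parts:
--         while remaining and not accepts(remaining[0], token):
--             remaining = remaining[1:]
--         if not remaining:
--             break
--         assigned[remaining[0]] = token
--         remaining = remaining[1:]
--     return {f: assigned.get(f, "") for f in fields}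
-- ===== Notes on version B (the rewrite author's own statement) =====
-- stated objective: alternative
-- what changed: Replaced A's field-driven parse (five unrolled if-blocks advancing a token cursor) with the dual token-driven traversal: iterate over the tokens, hand each to the earliest remaining field that accepts it (pruning the skipped fields), and build the result dict from the assignment map at the end.
import Mathlib
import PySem

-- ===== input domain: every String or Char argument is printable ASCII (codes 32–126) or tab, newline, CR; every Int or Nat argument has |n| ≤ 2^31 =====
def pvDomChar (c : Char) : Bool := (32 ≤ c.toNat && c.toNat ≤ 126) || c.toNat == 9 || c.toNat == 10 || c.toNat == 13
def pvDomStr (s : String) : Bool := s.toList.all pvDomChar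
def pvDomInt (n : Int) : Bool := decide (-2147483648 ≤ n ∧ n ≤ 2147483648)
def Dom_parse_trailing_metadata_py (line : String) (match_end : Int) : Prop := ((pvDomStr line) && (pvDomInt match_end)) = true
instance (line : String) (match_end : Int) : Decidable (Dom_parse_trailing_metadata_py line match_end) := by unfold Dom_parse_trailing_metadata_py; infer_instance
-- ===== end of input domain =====

-- B replaces A's field-driven cursor (five unrolled if-blocks advancing an index) by the dual token-driven traversal: each token is handed to the earliest remaining field that accepts it; objective: alternative. Same return value; no mutation involved.


-- hand port of s.rstrip("|"): drop exactly the trailing '|' characters (exact; PySem has no chars-rstrip)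
def pvRstripPipe (s : String) : String :=
  String.ofList ((s.toList.reverse.dropWhile (fun c => c == '|')).reverse)

-- ===== PORT A =====
-- A's five unrolled if-blocks over the state (meta, idx); meta is the pre-populated dict, 'in set' is List.contains
def pvAFinish (parts : List String) : List (String × String) :=
  let meta0 : PySem.Dict String String :=
    ((((PySem.Dict.empty.insert "rtep" "").insert "availability" "").insert "risk"
        "").insert "approval_status" "").insert "on_time" ""
  let kA : List String := ["Duration"]
  let kY : List String := ["No", "Yes"]
  let kAp : List String := ["Submitted", "Approved", "Received", "Withdrawn", "Denied"]
  let s0 : PySem.Dict String String × Nat := (meta0, 0)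
  let s1 := if s0.2 < parts.length ∧ (!(kA.contains (parts.getD s0.2 "")) && !(kY.contains (parts.getD s0.2 ""))) = true
            then (s0.1.insert "rtep" (parts.getD s0.2 ""), s0.2 + 1) else s0
  let s2 := if s1.2 < parts.length ∧ (kA.contains (parts.getD s1.2 "")) = true
            then (s1.1.insert "availability" (parts.getD s1.2 ""), s1.2 + 1) else s1
  let s3 := if s2.2 < parts.length ∧ (kY.contains (parts.getD s2.2 "")) = true
            then (s2.1.insert "risk" (parts.getD s2.2 ""), s2.2 + 1) else s2
  let s4 := if s3.2 < parts.length ∧ (kAp.contains (parts.getD s3.2 "")) = true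
            then (s3.1.insert "approval_status" (parts.getD s3.2 ""), s3.2 + 1) else s3
  let s5 := if s4.2 < parts.length ∧ (kY.contains (parts.getD s4.2 "")) = true
            then (s4.1.insert "on_time" (parts.getD s4.2 ""), s4.2 + 1) else s4
  s5.1.items

def parse_trailing_metadata_py (line : String) (match_end : Int) : List (String × String) :=
  let trailing := PySem.Str.strip (pvRstripPipe (PySem.Str.strip (PySem.Str.slice line (some match_end) none)))
  let parts := (PySem.Str.split₀ trailing).filter (fun p => !(p == "|"))
  pvAFinish parts

-- ===== PORT B =====
-- B's acceptance test: does `field` accept `token`?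
def pvAccepts (field token : String) : Bool :=
  if field == "rtep" then
    !(["Duration"].contains token) && !(["No", "Yes"].contains token)
  else if field == "availability" then
    ["Duration"].contains token
  else if field == "approval_status" then
    ["Submitted", "Approved", "Received", "Withdrawn", "Denied"].contains token
  else
    ["No", "Yes"].contains token  -- risk / on_time

def pvFields : List String := ["rtep", "availability", "risk", "approval_status", "on_time"]

-- B's token loop: each token goes to the earliest remaining field that accepts it
-- (the inner `while remaining and not accepts(...)` is the dropWhile)
def pvAssign : List String → List String → PySem.Dict String String → PySem.Dict String String
  | [], _, d => d
  | t :: ts, remaining, d =>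
    match remaining.dropWhile (fun f => !pvAccepts f t) with
    | [] => d
    | f :: rest => pvAssign ts rest (d.insert f t)

def parse_trailing_metadata_py_alt (line : String) (match_end : Int) : List (String × String) :=
  let trailing := PySem.Str.strip (pvRstripPipe (PySem.Str.strip (PySem.Str.slice line (some match_end) none)))
  let parts := (PySem.Str.split₀ trailing).filter (fun p => !(p == "|"))
  let assigned := pvAssign parts pvFields PySem.Dict.empty
  -- the dict comprehension {f: assigned.get(f, "") for f in fields}
  (pvFields.foldl (fun (d : PySem.Dict String String) f => d.insert f (assigned.getD f "")) PySem.Dict.empty).items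

-- ===== PRECONDITION & SPEC =====
def Spec_parse_trailing_metadata_py (line : String) (match_end : Int) (out : List (String × String)) : Prop := out = parse_trailing_metadata_py_alt line match_end
instance (line : String) (match_end : Int) (out : List (String × String)) : Decidable (Spec_parse_trailing_metadata_py line match_end out) := by unfold Spec_parse_trailing_metadata_py; infer_instance

-- ===== CLAIM (what is proved, stated in full; the proofs are below) =====
def Claim_equal_parse_trailing_metadata_py : Prop := ∀ (line : String) (match_end : Int), Dom_parse_trailing_metadata_py line match_end → Spec_parse_trailing_metadata_py line match_end (parse_trailing_metadata_py line match_end)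

-- ===== LEMMAS AND PROOFS =====

-- A's five statically-unrolled stages, as a generic runner over (key, predicate) stages (proof device)
def pvStagesA : List (String × (String → Bool)) :=
  [("rtep", fun t => !(["Duration"].contains t) && !(["No", "Yes"].contains t)),
   ("availability", fun t => ["Duration"].contains t),
   ("risk", fun t => ["No", "Yes"].contains t),
   ("approval_status", fun t => ["Submitted", "Approved", "Received", "Withdrawn", "Denied"].contains t),
   ("on_time", fun t => ["No", "Yes"].contains t)]

def pvMeta0 : PySem.Dict String String :=
  ((((PySem.Dict.empty.insert "rtep" "").insert "availability" "").insert "risk"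
      "").insert "approval_status" "").insert "on_time" ""

def pvRun : List (String × (String → Bool)) → List String →
    PySem.Dict String String × Nat → PySem.Dict String String × Nat
  | [], _, s => s
  | (k, p) :: sps, parts, s =>
    pvRun sps parts
      (if s.2 < parts.length ∧ p (parts.getD s.2 "") = true
       then (s.1.insert k (parts.getD s.2 ""), s.2 + 1) else s)

-- the field-driven greedy parse over (key, predicate) stages, index form …
def pvChainP : List (String × (String → Bool)) → List String → Nat → List (String × String)
  | [], _, _ => []
  | (k, p) :: sps, parts, i =>
    if i < parts.length ∧ p (parts.getD i "") = true then
      (k, parts.getD i "") :: pvChainP sps parts (i + 1)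
    else
      (k, "") :: pvChainP sps parts i

-- … over field names (pvAccepts), index form …
def pvChainIdx : List String → List String → Nat → List (String × String)
  | [], _, _ => []
  | f :: fs, parts, i =>
    if i < parts.length ∧ pvAccepts f (parts.getD i "") = true then
      (f, parts.getD i "") :: pvChainIdx fs parts (i + 1)
    else
      (f, "") :: pvChainIdx fs parts i

-- … and token-list form
def pvChainF : List String → List String → List (String × String)
  | [], _ => []
  | f :: fs, [] => (f, "") :: pvChainF fs []
  | f :: fs, t :: ts =>
    if pvAccepts f t then (f, t) :: pvChainF fs ts else (f, "") :: pvChainF fs (t :: ts)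

theorem pvAFinish_eq_run (parts : List String) :
    pvAFinish parts = (pvRun pvStagesA parts (pvMeta0, 0)).1.items := rfl

-- replacing key k in an association list that does not carry k changes nothing
theorem pvMapReplace_id (M : List (String × String)) (k v : String)
    (hM : k ∉ M.map Prod.fst) :
    M.map (fun q => if (q.1 == k) = true then (k, v) else q) = M := by
  induction M with
  | nil => rfl
  | cons q M ihM =>
    simp only [List.map_cons, List.mem_cons, not_or] at hM ⊢
    rw [if_neg (by simpa using (beq_eq_false_iff_ne.mpr (Ne.symm hM.1))), ihM hM.2]

theorem pvMapReplace (front L : List (String × String)) (k v w : String)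
    (hf : k ∉ front.map Prod.fst) (hL : k ∉ L.map Prod.fst) :
    (front ++ (k, w) :: L).map (fun q => if (q.1 == k) = true then (k, v) else q)
      = front ++ (k, v) :: L := by
  rw [List.map_append, List.map_cons, pvMapReplace_id front k v hf,
      pvMapReplace_id L k v hL, if_pos (by simp)]

-- items invariant of A's runner: each stage overwrites its own pre-seeded slot (or leaves it "")
theorem pvRun_items (sps : List (String × (String → Bool))) (parts : List String) :
    ∀ (i : Nat) (d : PySem.Dict String String) (front : List (String × String)),
      d.items = front ++ sps.map (fun sp => (sp.1, "")) →
      (front.map Prod.fst ++ sps.map (fun sp => sp.1)).Nodup →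
      (pvRun sps parts (d, i)).1.items = front ++ pvChainP sps parts i := by
  induction sps with
  | nil => intro i d front hitems _; simpa [pvRun, pvChainP] using hitems
  | cons sp sps ih =>
    obtain ⟨k, p⟩ := sp
    intro i d front hitems hnd
    simp only [List.map_cons] at hitems hnd
    have hmid := List.nodup_cons.mp (List.nodup_middle.mp hnd)
    have hkfront : k ∉ front.map Prod.fst := fun h => hmid.1 (List.mem_append_left _ h)
    have hksps : k ∉ sps.map (fun sp => sp.1) := fun h => hmid.1 (List.mem_append_right _ h)
    rw [pvRun]
    by_cases hc : i < parts.length ∧ p (parts.getD i "") = true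
    · rw [if_pos hc]
      have hmem : k ∈ d.items.map Prod.fst := by rw [hitems]; simp
      have hcont : d.contains k = true :=
        (PySem.Dict.contains_iff_mem_keys d k).mpr (by simpa [PySem.Dict.keys] using hmem)
      have hitems' : (d.insert k (parts.getD i "")).items
          = (front ++ [(k, parts.getD i "")]) ++ sps.map (fun sp => (sp.1, "")) := by
        rw [PySem.Dict.items_insert_of_contains d _ hcont, hitems,
            pvMapReplace front _ k _ "" hkfront
              (by simpa [List.map_map, Function.comp] using hksps)]
        simp
      have hnd' : ((front ++ [(k, parts.getD i "")]).map Prod.fst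
          ++ sps.map (fun sp => sp.1)).Nodup := by
        simpa only [List.map_append, List.map_cons, List.map_nil, List.append_assoc,
          List.singleton_append] using hnd
      rw [ih (i + 1) _ _ hitems' hnd', pvChainP, if_pos hc]
      simp
    · rw [if_neg hc]
      have hitems' : d.items = (front ++ [(k, "")]) ++ sps.map (fun sp => (sp.1, "")) := by
        rw [hitems]; simp
      have hnd' : ((front ++ [(k, "")]).map Prod.fst ++ sps.map (fun sp => sp.1)).Nodup := by
        simpa only [List.map_append, List.map_cons, List.map_nil, List.append_assoc,
          List.singleton_append] using hnd
      rw [ih i d _ hitems' hnd', pvChainP, if_neg hc]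
      simp

-- the two index chains coincide on the concrete five stages
theorem pvChainP_eq_chainIdx (parts : List String) (i : Nat) :
    pvChainP pvStagesA parts i = pvChainIdx pvFields parts i := by
  simp [pvStagesA, pvFields, pvChainP, pvChainIdx, pvAccepts]

theorem pvAFinish_eq_chainIdx (parts : List String) :
    pvAFinish parts = pvChainIdx pvFields parts 0 := by
  rw [pvAFinish_eq_run,
      pvRun_items pvStagesA parts 0 pvMeta0 [] (by rfl) (by decide),
      List.nil_append, pvChainP_eq_chainIdx]

theorem pvChainIdx_eq_chainF (fs : List String) (parts : List String) (i : Nat) :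
    pvChainIdx fs parts i = pvChainF fs (parts.drop i) := by
  induction fs generalizing i with
  | nil => simp [pvChainIdx, pvChainF]
  | cons f fs ih =>
    by_cases hi : i < parts.length
    · have hdrop : parts.drop i = parts[i] :: parts.drop (i + 1) :=
        List.drop_eq_getElem_cons hi
      have hget : parts.getD i "" = parts[i] := List.getD_eq_getElem _ _ hi
      rw [pvChainIdx, hdrop, pvChainF, hget]
      by_cases h : pvAccepts f parts[i] = true
      · simp [hi, h, ih]
      · simp [hi, h, ih, ← hdrop]
    · have hdrop : parts.drop i = [] := List.drop_eq_nil_of_le (by omega)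
      rw [pvChainIdx, hdrop, pvChainF]
      simp [hi, ih, hdrop]

-- lookups of fields outside the remaining schedule are untouched by the token loop
theorem pvAssign_getD_of_not_mem (ts : List String) (fs : List String)
    (d : PySem.Dict String String) (k : String) (hk : k ∉ fs) :
    (pvAssign ts fs d).getD k "" = d.getD k "" := by
  induction ts generalizing fs d with
  | nil => rfl
  | cons t ts ih =>
    rw [pvAssign]
    cases hdw : fs.dropWhile (fun f => !pvAccepts f t) with
    | nil => rfl
    | cons f rest =>
      have hsub : f :: rest ⊆ fs := by
        intro x hx
        exact (List.dropWhile_sublist (l := fs) (p := fun f => !pvAccepts f t)).subset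
          (hdw ▸ hx)
      have hkf : k ≠ f := by rintro rfl; exact hk (hsub List.mem_cons_self)
      have hkrest : k ∉ rest := fun h => hk (hsub (List.mem_cons_of_mem _ h))
      rw [ih rest _ hkrest, PySem.Dict.getD_insert_of_ne _ _ _ hkf]

-- the token-driven loop computes the field-driven greedy parse
theorem pvAssign_eq_chainF (fs : List String) (hnd : fs.Nodup) (ts : List String)
    (d : PySem.Dict String String) (hd : ∀ f ∈ fs, d.getD f "" = "") :
    fs.map (fun f => (f, (pvAssign ts fs d).getD f "")) = pvChainF fs ts := by
  induction fs generalizing ts d with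
  | nil => simp [pvChainF]
  | cons f fs ih =>
    have hfnot : f ∉ fs := (List.nodup_cons.mp hnd).1
    have hnd' : fs.Nodup := (List.nodup_cons.mp hnd).2
    cases ts with
    | nil =>
      rw [pvChainF]
      simp only [pvAssign, List.map_cons]
      rw [hd f List.mem_cons_self]
      congr 1
      exact ih hnd' [] d (fun g hg => hd g (List.mem_cons_of_mem _ hg))
    | cons t ts =>
      by_cases hacc : pvAccepts f t = true
      · -- f accepts t: consume both
        have hdw : (f :: fs).dropWhile (fun g => !pvAccepts g t) = f :: fs := by
          rw [List.dropWhile_cons]; simp [hacc]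
        rw [pvChainF, if_pos hacc]
        simp only [pvAssign, hdw, List.map_cons]
        rw [pvAssign_getD_of_not_mem ts fs _ f hfnot,
            PySem.Dict.getD_insert_self]
        congr 1
        exact ih hnd' ts (d.insert f t) (fun g hg => by
          have hgf : g ≠ f := by rintro rfl; exact hfnot hg
          rw [PySem.Dict.getD_insert_of_ne _ _ _ hgf]
          exact hd g (List.mem_cons_of_mem _ hg))
      · -- f rejects t: f stays empty, schedule shrinks
        have hdw : (f :: fs).dropWhile (fun g => !pvAccepts g t)
            = fs.dropWhile (fun g => !pvAccepts g t) := by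
          rw [List.dropWhile_cons]; simp [hacc]
        have hstep : pvAssign (t :: ts) (f :: fs) d = pvAssign (t :: ts) fs d := by
          rw [pvAssign, hdw, pvAssign]
        rw [pvChainF, if_neg hacc, List.map_cons, hstep]
        rw [pvAssign_getD_of_not_mem (t :: ts) fs d f hfnot, hd f List.mem_cons_self]
        congr 1
        exact ih hnd' (t :: ts) d (fun g hg => hd g (List.mem_cons_of_mem _ hg))

-- reading the comprehension dict back out: items is the map over the five fields
theorem pvItems_fold (a : PySem.Dict String String) :
    (pvFields.foldl (fun (d : PySem.Dict String String) f => d.insert f (a.getD f "")) PySem.Dict.empty).items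
      = pvFields.map (fun f => (f, a.getD f "")) := by
  rfl

-- ===== VERDICT (by name: the statement is the Claim_ definition above) =====
theorem parse_trailing_metadata_py_spec : Claim_equal_parse_trailing_metadata_py := by
  intro line match_end _
  unfold Spec_parse_trailing_metadata_py parse_trailing_metadata_py parse_trailing_metadata_py_alt
  rw [pvAFinish_eq_chainIdx, pvChainIdx_eq_chainF, List.drop_zero, pvItems_fold,
      pvAssign_eq_chainF pvFields (by decide) _ PySem.Dict.empty (fun f _ => rfl)]
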